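-- pv_equiv track=rewrite | github.com/wilmurillo-ai/Design-Assistant | .skills/openclaw-skills/skills/hanjing5024064/customer-pulse/scripts/followup_tracker.py | _find_customer_by_name
-- ===== SOURCE A (Python) =====
-- from typing import Any, Dict, List, Optional
--
-- def _find_customer_by_name(customers: List[Dict], name: str) -> Optional[Dict]:
--     """根据姓名查找客户（模糊匹配）。"""
--     name = name.strip()
--     for c in customers:
--         if c.get("name", "").strip() == name:
--             return c
--     for c in customers:
--         if name in c.get("name", ""):
--             return c
--     return None
-- ===== SOURCE B (Python) =====
-- def _find_customer_by_name(customers, name):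
--     """Single pass: return first exact (stripped) match immediately; remember first substring match as fallback."""
--     name = name.strip()
--     fallback = None
--     for c in customers:
--         nm = c.get("name", "")
--         if nm.strip() == name:
--             return c
--         if fallback is None and name in nm:
--             fallback = c
--     return fallback
-- ===== Notes on version B (the rewrite author's own statement) =====
-- stated objective: simpler
-- what changed: Replaces A's two sequential scans (exact pass, then substring pass) by one single pass that returns an exact match immediately and carries the first substring match as a fallback.
import Mathlib
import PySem

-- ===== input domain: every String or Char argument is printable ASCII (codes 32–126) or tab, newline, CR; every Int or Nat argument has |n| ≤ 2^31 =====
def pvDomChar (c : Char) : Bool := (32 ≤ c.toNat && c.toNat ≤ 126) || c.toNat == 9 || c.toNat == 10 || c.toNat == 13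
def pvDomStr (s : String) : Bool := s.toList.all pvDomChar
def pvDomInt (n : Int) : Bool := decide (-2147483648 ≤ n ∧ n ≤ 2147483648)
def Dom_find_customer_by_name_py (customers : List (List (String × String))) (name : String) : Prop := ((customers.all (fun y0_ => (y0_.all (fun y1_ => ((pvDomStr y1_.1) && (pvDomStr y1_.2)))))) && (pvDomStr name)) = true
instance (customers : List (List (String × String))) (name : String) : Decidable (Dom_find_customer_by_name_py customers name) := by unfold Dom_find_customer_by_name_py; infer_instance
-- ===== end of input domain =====

-- B collapses A's two sequential passes into a single loop carrying a first-substring-match fallback (objective: simpler).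


-- ===== PORT A =====
-- c.get("name", "")
def pvGetNameA (c : List (String × String)) : String :=
  PySem.Dict.getD (PySem.Dict.mk c) "name" ""

-- first loop: exact match on stripped names
def pvLoopExact (customers : List (List (String × String))) (name : String) :
    Option (List (String × String)) :=
  match customers with
  | [] => none
  | c :: rest =>
      if PySem.Str.strip (pvGetNameA c) == name then some c
      else pvLoopExact rest name

-- second loop: substring match
def pvLoopSub (customers : List (List (String × String))) (name : String) :
    Option (List (String × String)) :=
  match customers with
  | [] => none
  | c :: rest =>
      if PySem.Str.isIn name (pvGetNameA c) then some c
      else pvLoopSub rest name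

def find_customer_by_name_py (customers : List (List (String × String))) (name : String) : Option (List (String × String)) :=
  let name := PySem.Str.strip name
  match pvLoopExact customers name with
  | some c => some c
  | none =>
      match pvLoopSub customers name with
      | some c => some c
      | none => none

-- ===== PORT B =====
-- single pass with a fallback accumulator
def pvGoB (customers : List (List (String × String))) (name : String)
    (fallback : Option (List (String × String))) : Option (List (String × String)) :=
  match customers with
  | [] => fallback
  | c :: rest =>
      let nm := PySem.Dict.getD (PySem.Dict.mk c) "name" ""
      if PySem.Str.strip nm == name then some c
      else pvGoB rest name
        (if fallback.isNone && PySem.Str.isIn name nm then some c else fallback)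

def find_customer_by_name_py_alt (customers : List (List (String × String))) (name : String) : Option (List (String × String)) :=
  pvGoB customers (PySem.Str.strip name) none

-- ===== PRECONDITION & SPEC =====
def Spec_find_customer_by_name_py (customers : List (List (String × String))) (name : String) (out : Option (List (String × String))) : Prop := out = find_customer_by_name_py_alt customers name
instance (customers : List (List (String × String))) (name : String) (out : Option (List (String × String))) : Decidable (Spec_find_customer_by_name_py customers name out) := by unfold Spec_find_customer_by_name_py; infer_instance

-- ===== CLAIM (what is proved, stated in full; the proofs are below) =====
def Claim_equal_find_customer_by_name_py : Prop := ∀ (customers : List (List (String × String))) (name : String), Dom_find_customer_by_name_py customers name → Spec_find_customer_by_name_py customers name (find_customer_by_name_py customers name)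

-- ===== LEMMAS AND PROOFS =====
-- the single pass equals: exact-match result, else the incoming fallback, else the substring-match result
lemma pvGoB_eq (customers : List (List (String × String))) (name : String)
    (fb : Option (List (String × String))) :
    pvGoB customers name fb =
      ((pvLoopExact customers name).or (fb.or (pvLoopSub customers name))) := by
  induction customers generalizing fb with
  | nil => cases fb <;> simp [pvGoB, pvLoopExact, pvLoopSub]
  | cons c rest ih =>
      simp only [pvGoB, pvLoopExact, pvLoopSub, pvGetNameA]
      by_cases hx : (PySem.Str.strip (PySem.Dict.getD (PySem.Dict.mk c) "name" "") == name) = true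
      · simp [hx]
      · simp only [hx, if_neg, Bool.not_eq_true] at *
        rw [ih]
        cases fb with
        | some x => simp
        | none =>
            simp only [Option.isNone_none, Bool.true_and, Option.none_or]
            split_ifs <;> simp

-- ===== VERDICT (by name: the statement is the Claim_ definition above) =====
theorem find_customer_by_name_py_spec : Claim_equal_find_customer_by_name_py := by
  intro customers name _
  unfold Spec_find_customer_by_name_py find_customer_by_name_py find_customer_by_name_py_alt
  rw [pvGoB_eq]
  cases hx : pvLoopExact customers (PySem.Str.strip name) with
  | some c => simp [hx]
  | none => cases hs : pvLoopSub customers (PySem.Str.strip name) <;> simp [hx, hs]
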